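-- pv_equiv track=rewrite | github.com/MaGGisteRP/LANG_py | lab_9/1.py | get_sum_min_max
-- ===== SOURCE A (Python) =====
-- def get_sum_min_max(matrix):
--     total = 0
--     min_element = 10**100
--     max_element = -10**100
--     for row in matrix:
--         for element in row:
--             total += element
--             min_element = min(min_element, element)
--             max_element = max(max_element, element)
--     return total, min_element, max_element
-- ===== SOURCE B (Python) =====
-- def get_sum_min_max(matrix):
--     flat = [element for row in matrix for element in row]
--     return (sum(flat),
--             min(flat, default=10**100),
--             max(flat, default=-10**100))
-- ===== Notes on version B (the rewrite author's own statement) =====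
-- stated objective: idiomatic
-- what changed: A's single fused Python-level loop with three running accumulators is replaced by flattening the matrix once and computing the three results with independent library reductions sum/min/max (with A's sentinels as defaults for the empty case), which run at C speed.
import Mathlib
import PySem

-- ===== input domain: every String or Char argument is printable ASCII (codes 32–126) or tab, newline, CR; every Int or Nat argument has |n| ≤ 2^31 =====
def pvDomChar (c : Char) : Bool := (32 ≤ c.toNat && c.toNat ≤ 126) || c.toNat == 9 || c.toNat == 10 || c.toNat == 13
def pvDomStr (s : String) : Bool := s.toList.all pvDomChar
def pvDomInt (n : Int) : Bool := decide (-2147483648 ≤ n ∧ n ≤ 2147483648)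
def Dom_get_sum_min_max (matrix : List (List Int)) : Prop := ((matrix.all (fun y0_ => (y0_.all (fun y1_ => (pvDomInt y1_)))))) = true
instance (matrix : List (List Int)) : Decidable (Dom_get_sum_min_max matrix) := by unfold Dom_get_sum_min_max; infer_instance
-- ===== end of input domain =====

-- B replaces A's single fused loop (three running accumulators) by one flatten pass plus
-- three independent library reductions sum/min/max with A's sentinels as empty-defaults (idiomatic).

-- ===== PORT A =====
-- A: one fused loop over rows and elements, updating (total, min_element, max_element).
def get_sum_min_max (matrix : List (List Int)) : Int × Int × Int :=
  matrix.foldl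
    (fun st row =>
      row.foldl (fun (st : Int × Int × Int) element =>
        (st.1 + element, min st.2.1 element, max st.2.2 element)) st)
    (0, 10^100, -(10^100))

-- ===== PORT B =====
-- min(l, default=d) / max(l, default=d)
def pyMinD (l : List Int) (d : Int) : Int :=
  match l with
  | [] => d
  | h :: t => t.foldl min h

def pyMaxD (l : List Int) (d : Int) : Int :=
  match l with
  | [] => d
  | h :: t => t.foldl max h

def get_sum_min_max_alt (matrix : List (List Int)) : Int × Int × Int :=
  let flat := matrix.flatMap (fun row => row)
  (flat.foldl (· + ·) 0, pyMinD flat (10^100), pyMaxD flat (-(10^100)))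

-- ===== PRECONDITION & SPEC =====
def Spec_get_sum_min_max (matrix : List (List Int)) (out : Int × Int × Int) : Prop := out = get_sum_min_max_alt matrix
instance (matrix : List (List Int)) (out : Int × Int × Int) : Decidable (Spec_get_sum_min_max matrix out) := by unfold Spec_get_sum_min_max; infer_instance

-- ===== CLAIM (what is proved, stated in full; the proofs are below) =====
def Claim_equal_get_sum_min_max : Prop := ∀ (matrix : List (List Int)), Dom_get_sum_min_max matrix → Spec_get_sum_min_max matrix (get_sum_min_max matrix)

-- ===== LEMMAS AND PROOFS =====

theorem row_foldl (row : List Int) (t mn mx : Int) :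
    row.foldl (fun (st : Int × Int × Int) element =>
        (st.1 + element, min st.2.1 element, max st.2.2 element)) (t, mn, mx)
      = (row.foldl (· + ·) t, row.foldl min mn, row.foldl max mx) := by
  induction row generalizing t mn mx with
  | nil => rfl
  | cons h tl ih => simp only [List.foldl_cons]; exact ih _ _ _

theorem matrix_foldl (matrix : List (List Int)) (t mn mx : Int) :
    matrix.foldl
      (fun st row =>
        row.foldl (fun (st : Int × Int × Int) element =>
          (st.1 + element, min st.2.1 element, max st.2.2 element)) st) (t, mn, mx)
      = ((matrix.flatMap (fun row => row)).foldl (· + ·) t,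
         (matrix.flatMap (fun row => row)).foldl min mn,
         (matrix.flatMap (fun row => row)).foldl max mx) := by
  induction matrix generalizing t mn mx with
  | nil => rfl
  | cons row rest ih =>
      simp only [List.foldl_cons, List.flatMap_cons, List.foldl_append]
      rw [row_foldl, ih]

theorem foldl_min_sentinel (l : List Int) (d : Int)
    (h : ∀ e ∈ l, e ≤ d) : l.foldl min d = pyMinD l d := by
  cases l with
  | nil => rfl
  | cons h0 t =>
      simp only [List.foldl_cons, pyMinD]
      rw [min_eq_right (h h0 (by simp))]

theorem foldl_max_sentinel (l : List Int) (d : Int)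
    (h : ∀ e ∈ l, d ≤ e) : l.foldl max d = pyMaxD l d := by
  cases l with
  | nil => rfl
  | cons h0 t =>
      simp only [List.foldl_cons, pyMaxD]
      rw [max_eq_right (h h0 (by simp))]

-- ===== VERDICT (by name: the statement is the Claim_ definition above) =====
theorem get_sum_min_max_spec : Claim_equal_get_sum_min_max := by
  intro matrix hdom
  have hbound : ∀ e ∈ matrix.flatMap (fun row => row),
      -2147483648 ≤ e ∧ e ≤ 2147483648 := by
    intro e he
    rcases List.mem_flatMap.mp he with ⟨row, hrow, he'⟩
    have h1 := (List.all_eq_true.mp hdom) row hrow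
    have h2 := (List.all_eq_true.mp h1) e he'
    simpa [pvDomInt] using h2
  unfold Spec_get_sum_min_max get_sum_min_max get_sum_min_max_alt
  rw [matrix_foldl]
  rw [foldl_min_sentinel _ _ (fun e he => le_trans (hbound e he).2 (by norm_num))]
  rw [foldl_max_sentinel _ _ (fun e he => le_trans (by norm_num) (hbound e he).1)]
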